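-- pv_equiv track=rewrite | github.com/Paul720810/EWI-EasyPlay-Scores | backend/services.py | _simplify_notes
-- ===== SOURCE A (Python) =====
-- from typing import Dict, List, Optional, Tuple
--
-- def _simplify_notes(notes: List, min_duration: int = 5) -> List[Dict]:
--     """簡化音符序列，合併連續相同的音符"""
--     if not notes:
--         return []
--
--     simplified = []
--     current_note = None
--     count = 0
--
--     for note in notes:
--         if note is None:
--             if current_note and count >= min_duration:
--                 simplified.append(current_note)
--             current_note = None
--             count = 0
--         elif current_note is None or note['note'] != current_note['note']:
--             if current_note and count >= min_duration:
--                 simplified.append(current_note)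
--             current_note = note
--             count = 1
--         else:
--             count += 1
--
--     if current_note and count >= min_duration:
--         simplified.append(current_note)
--
--     return simplified
-- ===== SOURCE B (Python) =====
-- def _simplify_notes(notes, min_duration=5):
--     """Staged index passes: key list, run-start indices by adjacent comparison,
--     then filter runs by length (difference of consecutive starts)."""
--     keys = [None if x is None else ('N', x['note']) for x in notes]
--     n = len(notes)
--     starts = [i for i in range(n) if i == 0 or keys[i] != keys[i - 1]]
--     result = []
--     for s, e in zip(starts, starts[1:] + [n]):
--         if keys[s] is not None and e - s >= min_duration:
--             result.append(notes[s])
--     return result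
-- ===== Notes on version B (the rewrite author's own statement) =====
-- stated objective: alternative
-- what changed: Replaced A's single-pass current_note/count state machine with staged index passes: compute a key list, collect run-start indices by comparing adjacent keys, then filter runs by the difference of consecutive start indices.
-- outside the precondition, e.g. on _simplify_notes([None, {}], -1): A returns [], B raises KeyError
import Mathlib
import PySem

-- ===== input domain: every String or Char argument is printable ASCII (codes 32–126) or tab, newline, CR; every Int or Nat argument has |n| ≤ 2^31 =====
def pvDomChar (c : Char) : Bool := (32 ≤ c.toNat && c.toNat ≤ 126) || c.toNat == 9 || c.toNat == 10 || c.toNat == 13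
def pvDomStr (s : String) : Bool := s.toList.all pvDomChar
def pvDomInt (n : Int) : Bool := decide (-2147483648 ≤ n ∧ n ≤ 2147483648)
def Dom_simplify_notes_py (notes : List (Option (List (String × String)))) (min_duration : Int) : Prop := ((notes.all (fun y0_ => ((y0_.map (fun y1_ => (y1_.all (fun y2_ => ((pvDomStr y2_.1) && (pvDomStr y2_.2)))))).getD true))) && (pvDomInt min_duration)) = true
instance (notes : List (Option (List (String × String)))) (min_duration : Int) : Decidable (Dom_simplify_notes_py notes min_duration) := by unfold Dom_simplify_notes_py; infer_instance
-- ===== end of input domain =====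

-- B replaces A's single-pass current_note/count state machine by staged index passes
-- (key list, run-start indices by adjacent comparison, filter by consecutive-start
-- differences); objective: alternative decomposition, same O(n) cost.

-- ===== PORT A =====
-- note['note'] : exact under Pre_ (the dict contains key "note"; Python raises KeyError otherwise)
def pvNoteVal (d : List (String × String)) : String := (PySem.Dict.mk d).getD "note" ""

-- `if current_note and count >= min_duration: simplified.append(current_note)` (empty dict is falsy)
def pvFlushA (cur : Option (List (String × String))) (cnt min_duration : Int) :
    List (List (String × String)) :=
  match cur with
  | some c => if c ≠ [] ∧ min_duration ≤ cnt then [c] else []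
  | none => []

-- loop body of A: state = (simplified, current_note, count)
def pvStepA (min_duration : Int)
    (st : List (List (String × String)) × Option (List (String × String)) × Int)
    (note : Option (List (String × String))) :
    List (List (String × String)) × Option (List (String × String)) × Int :=
  match note with
  | none => (st.1 ++ pvFlushA st.2.1 st.2.2 min_duration, none, 0)
  | some d =>
    match st.2.1 with
    | none => (st.1, some d, 1)
    | some c =>
      if pvNoteVal d ≠ pvNoteVal c then
        (st.1 ++ pvFlushA (some c) st.2.2 min_duration, some d, 1)
      else (st.1, some c, st.2.2 + 1)

def simplify_notes_py (notes : List (Option (List (String × String)))) (min_duration : Int) :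
    List (List (String × String)) :=
  if notes = [] then []
  else
    let st := notes.foldl (pvStepA min_duration) ([], none, 0)
    st.1 ++ pvFlushA st.2.1 st.2.2 min_duration

-- ===== PORT B =====
-- keys[i]: None for a separator, ('N', x['note']) for a note → Option String
def pvKeyB (x : Option (List (String × String))) : Option String :=
  match x with
  | none => none
  | some d => some ((PySem.Dict.mk d).getD "note" "")

-- `i == 0 or keys[i] != keys[i - 1]` (indices produced by range(n) are in range)
def pvStartPred (keys : List (Option String)) (i : Int) : Bool :=
  i == 0 || !(PySem.List.pyGetD keys i none == PySem.List.pyGetD keys (i - 1) none)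

-- loop body of B: `if keys[s] is not None and e - s >= min_duration: result.append(notes[s])`
def pvStepB (keys : List (Option String)) (notes : List (Option (List (String × String))))
    (min_duration : Int) (res : List (List (String × String))) (se : Int × Int) :
    List (List (String × String)) :=
  if PySem.List.pyGetD keys se.1 none ≠ none ∧ min_duration ≤ se.2 - se.1 then
    match PySem.List.pyGetD notes se.1 none with
    | some d => res ++ [d]
    | none => res
  else res

def simplify_notes_py_alt (notes : List (Option (List (String × String)))) (min_duration : Int) :
    List (List (String × String)) :=
  let keys := notes.map pvKeyB
  let n : Int := (notes.length : Int)
  let starts := (PySem.List.pyRange 0 n 1).filter (pvStartPred keys)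
  (starts.zip (PySem.List.slice starts (some 1) none ++ [n])).foldl
    (pvStepB keys notes min_duration) []

-- ===== PRECONDITION & SPEC =====
-- Pre_ excludes lists containing a dict without the key "note": on those A usually raises KeyError too,
-- but may return (short-circuit never reads note['note'], e.g. a falsy {} current note), while B always
-- evaluates x['note'] when building the key list and raises.
def Pre_simplify_notes_py (notes : List (Option (List (String × String)))) (min_duration : Int) : Prop :=
  ∀ x ∈ notes, ∀ d, x = some d → (PySem.Dict.mk d).contains "note" = true

instance (notes : List (Option (List (String × String)))) (min_duration : Int) : Decidable (Pre_simplify_notes_py notes min_duration) := by unfold Pre_simplify_notes_py; infer_instance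

def pvWitness_simplify_notes_py : (List (Option (List (String × String)))) × Int :=
  ([some [("note", "a")], some [("note", "a")], none, some [("note", "b")]], 2)

def Spec_simplify_notes_py (notes : List (Option (List (String × String)))) (min_duration : Int) (out : List (List (String × String))) : Prop := out = simplify_notes_py_alt notes min_duration
instance (notes : List (Option (List (String × String)))) (min_duration : Int) (out : List (List (String × String))) : Decidable (Spec_simplify_notes_py notes min_duration out) := by unfold Spec_simplify_notes_py; infer_instance

-- ===== CLAIM (what is proved, stated in full; the proofs are below) =====
def Claim_equal_simplify_notes_py : Prop := ∀ (notes : List (Option (List (String × String)))) (min_duration : Int), Dom_simplify_notes_py notes min_duration → Pre_simplify_notes_py notes min_duration → Spec_simplify_notes_py notes min_duration (simplify_notes_py notes min_duration)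

-- ===== LEMMAS AND PROOFS =====

-- ---- proof-side intermediate: the run decomposition of the note list (groupby form) ----

def pvGroups : List (Option (List (String × String))) →
    List (List (Option (List (String × String))))
  | [] => []
  | x :: xs =>
    (x :: xs.takeWhile (fun y => pvKeyB y == pvKeyB x)) ::
      pvGroups (xs.dropWhile (fun y => pvKeyB y == pvKeyB x))
termination_by l => l.length
decreasing_by
  simp only [List.length_cons]
  exact Nat.lt_succ_of_le (List.length_dropWhile_le _ _)

def pvStepG (min_duration : Int) (res : List (List (String × String)))
    (g : List (Option (List (String × String)))) : List (List (String × String)) :=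
  match g with
  | some d :: _ => if min_duration ≤ (g.length : Int) then res ++ [d] else res
  | _ => res

-- the groupby formulation of the task: proof-side reference both ports are compared with
def pvGB (notes : List (Option (List (String × String)))) (min_duration : Int) :
    List (List (String × String)) :=
  (pvGroups notes).foldl (pvStepG min_duration) []

theorem pvStepG_acc (min_duration : Int) (gs : List (List (Option (List (String × String)))))
    (res : List (List (String × String))) :
    gs.foldl (pvStepG min_duration) res = res ++ gs.foldl (pvStepG min_duration) [] := by
  induction gs generalizing res with
  | nil => simp
  | cons g gs ih =>
    simp only [List.foldl_cons]
    rw [ih, ih (pvStepG min_duration [] g)]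
    cases g with
    | nil => simp [pvStepG]
    | cons x t =>
      cases x with
      | none => simp [pvStepG]
      | some d =>
        simp only [pvStepG]
        split_ifs <;> simp

theorem pvGB_cons_none (notes : List (Option (List (String × String)))) (min_duration : Int) :
    pvGB (none :: notes) min_duration
      = pvGB (notes.dropWhile (fun y => pvKeyB y == pvKeyB none)) min_duration := by
  simp only [pvGB, pvGroups, List.foldl_cons]
  rfl

theorem pvGB_drop_none (notes : List (Option (List (String × String)))) (min_duration : Int) :
    pvGB notes min_duration
      = pvGB (notes.dropWhile (fun y => pvKeyB y == pvKeyB none)) min_duration := by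
  cases notes with
  | nil => rfl
  | cons x xs =>
    cases x with
    | none =>
      rw [pvGB_cons_none]
      simp [List.dropWhile, pvKeyB]
    | some d =>
      simp [List.dropWhile, pvKeyB]

theorem pvGB_cons_some (d : List (String × String)) (notes : List (Option (List (String × String))))
    (min_duration : Int) :
    pvGB (some d :: notes) min_duration
      = (if min_duration ≤ (1 + (notes.takeWhile (fun y => pvKeyB y == pvKeyB (some d))).length : Int)
          then [d] else [])
        ++ pvGB (notes.dropWhile (fun y => pvKeyB y == pvKeyB (some d))) min_duration := by
  simp only [pvGB, pvGroups, List.foldl_cons]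
  rw [pvStepG_acc]
  simp only [pvStepG, List.length_cons]
  split_ifs with h1 h2 h2
  · simp
  · exfalso; push_cast at h1 h2; omega
  · exfalso; push_cast at h1 h2; omega
  · simp

-- A's accumulator only grows as a prefix
theorem pvStepA_factor (min_duration : Int) (l : List (Option (List (String × String))))
    (sim : List (List (String × String))) (cur : Option (List (String × String))) (cnt : Int) :
    l.foldl (pvStepA min_duration) (sim, cur, cnt)
      = (sim ++ (l.foldl (pvStepA min_duration) ([], cur, cnt)).1,
         (l.foldl (pvStepA min_duration) ([], cur, cnt)).2) := by
  induction l generalizing sim cur cnt with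
  | nil => simp
  | cons x xs ih =>
    simp only [List.foldl_cons]
    cases x with
    | none =>
      simp only [pvStepA, List.nil_append]
      rw [ih _ none 0, ih (pvFlushA cur cnt min_duration) none 0]
      simp
    | some d =>
      cases cur with
      | none =>
        simp only [pvStepA]
        rw [ih]
      | some c =>
        simp only [pvStepA]
        split_ifs
        · simp only [List.nil_append]
          rw [ih _ (some d) 1, ih (pvFlushA (some c) cnt min_duration) (some d) 1]
          simp
        · rw [ih]

-- finish of A's state
def pvFinA (min_duration : Int)
    (st : List (List (String × String)) × Option (List (String × String)) × Int) :
    List (List (String × String)) :=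
  st.1 ++ pvFlushA st.2.1 st.2.2 min_duration

theorem pvKeyB_some (d : List (String × String)) : pvKeyB (some d) = some (pvNoteVal d) := rfl

-- key "note" present ⇒ dict non-empty
theorem pvContains_ne_nil (d : List (String × String))
    (h : (PySem.Dict.mk d).contains "note" = true) : d ≠ [] := by
  intro hd; subst hd; simp [PySem.Dict.contains_mk] at h

-- finish of a prefixed state
theorem pvFinA_append (min_duration : Int) (s : List (List (String × String)))
    (t : List (List (String × String)) × Option (List (String × String)) × Int) :
    pvFinA min_duration (s ++ t.1, t.2) = s ++ pvFinA min_duration t := by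
  simp [pvFinA]

-- the main invariant, by strong induction on the list length:
-- part 1: from the reset state A computes the groupby form; part 2: mid-run, A flushes
-- the current run then computes the groupby form of the rest
theorem pvMain (min_duration : Int) : ∀ (n : Nat) (l : List (Option (List (String × String)))),
    l.length ≤ n →
    (∀ x ∈ l, ∀ d, x = some d → (PySem.Dict.mk d).contains "note" = true) →
    (pvFinA min_duration (l.foldl (pvStepA min_duration) ([], none, 0))
        = pvGB l min_duration)
    ∧ (∀ (c : List (String × String)) (cnt : Int),
        (PySem.Dict.mk c).contains "note" = true → 1 ≤ cnt →
        pvFinA min_duration (l.foldl (pvStepA min_duration) ([], some c, cnt))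
          = (if min_duration ≤ cnt + ((l.takeWhile (fun y => pvKeyB y == pvKeyB (some c))).length : Int)
              then [c] else [])
            ++ pvGB (l.dropWhile (fun y => pvKeyB y == pvKeyB (some c))) min_duration) := by
  intro n
  induction n with
  | zero =>
    intro l hl _
    have : l = [] := List.eq_nil_of_length_eq_zero (Nat.le_zero.mp hl)
    subst this
    constructor
    · simp [pvFinA, pvFlushA, pvGB, pvGroups]
    · intro c cnt hc hcnt
      have hcne := pvContains_ne_nil c hc
      simp only [List.foldl_nil, List.takeWhile_nil, List.dropWhile_nil, pvFinA, pvFlushA,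
        pvGB, pvGroups, List.foldl_nil, List.length_nil]
      split_ifs with h1 h2 h2 <;> simp_all <;> omega
  | succ n ih =>
    intro l hl hpre
    cases l with
    | nil =>
      constructor
      · simp [pvFinA, pvFlushA, pvGB, pvGroups]
      · intro c cnt hc hcnt
        have hcne := pvContains_ne_nil c hc
        simp only [List.foldl_nil, List.takeWhile_nil, List.dropWhile_nil, pvFinA, pvFlushA,
          pvGB, pvGroups, List.foldl_nil, List.length_nil]
        split_ifs with h1 h2 h2 <;> simp_all <;> omega
    | cons x xs =>
      have hxs : xs.length ≤ n := by simpa using Nat.lt_succ_iff.mp (Nat.lt_of_lt_of_le (by simp) hl)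
      have hprex : ∀ x' ∈ xs, ∀ d, x' = some d → (PySem.Dict.mk d).contains "note" = true :=
        fun x' hx' => hpre x' (List.mem_cons_of_mem _ hx')
      constructor
      · -- from reset state
        cases x with
        | none =>
          simp only [List.foldl_cons, pvStepA, pvFlushA, List.append_nil]
          rw [(ih xs hxs hprex).1, pvGB_cons_none]
          rw [← pvGB_drop_none]
        | some d =>
          have hd := hpre (some d) List.mem_cons_self d rfl
          simp only [List.foldl_cons, pvStepA]
          rw [(ih xs hxs hprex).2 d 1 hd (le_refl 1), pvGB_cons_some]
      · -- mid-run with current note c, count cnt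
        intro c cnt hc hcnt
        have hcne := pvContains_ne_nil c hc
        cases x with
        | none =>
          simp only [List.foldl_cons, pvStepA, pvFlushA, List.nil_append]
          rw [pvStepA_factor, pvFinA_append, (ih xs hxs hprex).1]
          have htk : (none :: xs).takeWhile (fun y => pvKeyB y == pvKeyB (some c)) = [] := by
            simp [List.takeWhile, pvKeyB]
          have hdp : (none :: xs).dropWhile (fun y => pvKeyB y == pvKeyB (some c)) = none :: xs := by
            simp [List.dropWhile, pvKeyB]
          rw [htk, hdp, pvGB_cons_none, ← pvGB_drop_none]
          simp only [List.length_nil, Nat.cast_zero, add_zero, ne_eq, hcne, not_false_eq_true,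
            true_and]
        | some d =>
          have hd := hpre (some d) List.mem_cons_self d rfl
          by_cases hkey : pvNoteVal d ≠ pvNoteVal c
          · -- different key: flush c, start run on d
            simp only [List.foldl_cons, pvStepA, if_pos hkey, pvFlushA, List.nil_append]
            rw [pvStepA_factor, pvFinA_append, (ih xs hxs hprex).2 d 1 hd (le_refl 1)]
            have hpd : (pvKeyB (some d) == pvKeyB (some c)) = false := by
              simp [pvKeyB_some]
              exact fun h => absurd h hkey
            have htk : (some d :: xs).takeWhile (fun y => pvKeyB y == pvKeyB (some c)) = [] := by
              simp [List.takeWhile, hpd]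
            have hdp : (some d :: xs).dropWhile (fun y => pvKeyB y == pvKeyB (some c))
                = some d :: xs := by
              simp [List.dropWhile, hpd]
            rw [htk, hdp, pvGB_cons_some]
            simp only [List.length_nil, Nat.cast_zero, add_zero, ne_eq, hcne, not_false_eq_true,
              true_and]
          · -- same key: continue the run
            rw [not_not] at hkey
            have hnd : ¬ pvNoteVal d ≠ pvNoteVal c := by simp [hkey]
            simp only [List.foldl_cons, pvStepA, if_neg hnd]
            rw [(ih xs hxs hprex).2 c (cnt + 1) hc (by omega)]
            have hpd : (pvKeyB (some d) == pvKeyB (some c)) = true := by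
              simp [pvKeyB_some, hkey]
            have htk : (some d :: xs).takeWhile (fun y => pvKeyB y == pvKeyB (some c))
                = some d :: xs.takeWhile (fun y => pvKeyB y == pvKeyB (some c)) := by
              simp [List.takeWhile, hpd]
            have hdp : (some d :: xs).dropWhile (fun y => pvKeyB y == pvKeyB (some c))
                = xs.dropWhile (fun y => pvKeyB y == pvKeyB (some c)) := by
              simp [List.dropWhile, hpd]
            rw [htk, hdp, List.length_cons]
            have harith : cnt + 1 + ((xs.takeWhile (fun y => pvKeyB y == pvKeyB (some c))).length : Int)
                = cnt + (((xs.takeWhile (fun y => pvKeyB y == pvKeyB (some c))).length + 1 : Nat) : Int) := by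
              push_cast; ring
            rw [harith]

-- ---- bridge: the index/starts formulation (port B) equals the groupby formulation ----

-- Nat-level run-start index list of a key list
def pvPN (ks : List (Option String)) (k : Nat) : Bool :=
  k == 0 || !(ks.getD k none == ks.getD (k - 1) none)

def pvSN (ks : List (Option String)) : List Nat :=
  (List.range ks.length).filter (pvPN ks)

-- Nat-level loop body
def pvStepN (ks : List (Option String)) (notes : List (Option (List (String × String))))
    (min_duration : Int) (res : List (List (String × String))) (se : Nat × Nat) :
    List (List (String × String)) :=
  if ks.getD se.1 none ≠ none ∧ min_duration ≤ (se.2 : Int) - (se.1 : Int) then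
    match notes.getD se.1 none with
    | some d => res ++ [d]
    | none => res
  else res

theorem pvStepN_acc (ks : List (Option String)) (notes : List (Option (List (String × String))))
    (m : Int) (l : List (Nat × Nat)) (res : List (List (String × String))) :
    l.foldl (pvStepN ks notes m) res = res ++ l.foldl (pvStepN ks notes m) [] := by
  induction l generalizing res with
  | nil => simp
  | cons p l ih =>
    simp only [List.foldl_cons]
    rw [ih, ih (pvStepN ks notes m [] p)]
    simp only [pvStepN]
    split_ifs
    · cases notes.getD p.1 none <;> simp
    · simp

-- Nat → Int cast as a plain function (keeps `List.map` applications first-order)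
def pvCastN (k : Nat) : Int := k

-- the Int start list of port B is the Nat start list, cast
theorem pvStarts_eq (l : List (Option (List (String × String)))) :
    (PySem.List.pyRange 0 (l.length : Int) 1).filter (pvStartPred (l.map pvKeyB))
      = (pvSN (l.map pvKeyB)).map pvCastN := by
  rw [PySem.List.pyRange_one]
  have h0 : (fun k : Nat => (0 : Int) + ↑k) = pvCastN := by
    funext k; simp [pvCastN]
  simp only [sub_zero, Int.toNat_natCast, h0]
  rw [List.filter_map]
  have hcg : ∀ k ∈ List.range l.length,
      (pvStartPred (l.map pvKeyB) ∘ pvCastN) k = pvPN (l.map pvKeyB) k := by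
    intro k _
    cases k with
    | zero => simp [pvStartPred, pvPN, pvCastN]
    | succ j =>
      simp only [Function.comp_apply, pvStartPred, pvPN, pvCastN]
      have h1 : (((j + 1 : Nat) : Int) == (0 : Int)) = false := by
        rw [beq_eq_false_iff_ne]; push_cast; omega
      have h2 : ((j + 1 : Nat) : Int) - 1 = ((j : Nat) : Int) := by push_cast; ring
      have h3 : ((j + 1 : Nat) == (0 : Nat)) = false := by simp
      have h4 : (j + 1) - 1 = j := by omega
      rw [h1, h2, h3, h4, PySem.List.pyGetD_natCast, PySem.List.pyGetD_natCast]
  unfold pvSN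
  rw [List.length_map, List.filter_congr hcg]

theorem pvSN_nil : pvSN [] = [] := rfl

-- a non-empty key list always starts a run at index 0
theorem pvSN_ne_nil (ks : List (Option String)) (h : ks ≠ []) :
    ∃ S2, pvSN ks = 0 :: S2 := by
  cases ks with
  | nil => exact absurd rfl h
  | cons c cs =>
    refine ⟨((List.range cs.length).map Nat.succ).filter (pvPN (c :: cs)), ?_⟩
    unfold pvSN
    rw [List.length_cons, List.range_succ_eq_map, List.filter_cons]
    simp [pvPN]

-- the run-start list of a constant run followed by a differently-keyed rest
theorem pvSN_shift (a : Option String) (ks' : List (Option String)) (L : Nat) (hL : 1 ≤ L)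
    (hb : ks' ≠ [] → ks'.getD 0 none ≠ a) :
    pvSN (List.replicate L a ++ ks') = 0 :: (pvSN ks').map (· + L) := by
  have hlen : (List.replicate L a).length = L := List.length_replicate
  have hget : ∀ i, i < L → (List.replicate L a ++ ks').getD i none = a := by
    intro i hi
    rw [List.getD_eq_getElem?_getD, List.getElem?_append_left (by omega),
      List.getElem?_replicate_of_lt hi, Option.getD_some]
  have hget2 : ∀ j, (List.replicate L a ++ ks').getD (L + j) none = ks'.getD j none := by
    intro j
    rw [List.getD_eq_getElem?_getD, List.getElem?_append_right (by omega), hlen,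
      Nat.add_sub_cancel_left, List.getD_eq_getElem?_getD]
  unfold pvSN
  rw [List.length_append, hlen, List.range_add, List.filter_append]
  have hpart1 : (List.range L).filter (pvPN (List.replicate L a ++ ks')) = [0] := by
    obtain ⟨L', rfl⟩ : ∃ L', L = L' + 1 := ⟨L - 1, by omega⟩
    rw [List.range_succ_eq_map, List.filter_cons]
    rw [if_pos (by simp [pvPN])]
    have : ((List.range L').map Nat.succ).filter (pvPN (List.replicate (L' + 1) a ++ ks')) = [] := by
      apply List.filter_eq_nil_iff.mpr
      intro x hx
      obtain ⟨j, hj, rfl⟩ := List.mem_map.mp hx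
      have hj' := List.mem_range.mp hj
      simp only [pvPN, Nat.succ_eq_add_one, Nat.add_sub_cancel]
      rw [hget (j + 1) (by omega), hget j (by omega)]
      simp
    rw [this]
  have hpart2 : ((List.range ks'.length).map (L + ·)).filter (pvPN (List.replicate L a ++ ks'))
      = ((List.range ks'.length).filter (pvPN ks')).map (· + L) := by
    rw [List.filter_map]
    have hcg : ∀ j ∈ List.range ks'.length,
        (pvPN (List.replicate L a ++ ks') ∘ (L + ·)) j = pvPN ks' j := by
      intro j hj
      have hj' := List.mem_range.mp hj
      have hne : ks' ≠ [] := by intro h; subst h; simp at hj'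
      simp only [Function.comp_apply, pvPN]
      have hz : ((L + j) == (0 : Nat)) = false := by simp; omega
      rw [hz, hget2 j]
      cases j with
      | zero =>
        have he : L + 0 - 1 < L := by omega
        rw [hget (L + 0 - 1) he]
        have hba := hb hne
        rw [List.getD_eq_getElem?_getD] at hba
        simp [hba]
      | succ j' =>
        have he : L + (j' + 1) - 1 = L + j' := by omega
        rw [he, hget2 j']
        simp
    rw [List.filter_congr hcg]
    have : (fun x : Nat => L + x) = (fun x : Nat => x + L) := by funext x; omega
    rw [this]
  rw [hpart1, hpart2]
  rfl

-- port B in Nat-index form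
theorem pvAlt_eq_fold (l : List (Option (List (String × String)))) (m : Int) :
    simplify_notes_py_alt l m
      = ((pvSN (l.map pvKeyB)).zip ((pvSN (l.map pvKeyB)).tail ++ [l.length])).foldl
          (pvStepN (l.map pvKeyB) l m) [] := by
  simp only [simplify_notes_py_alt]
  rw [pvStarts_eq, PySem.List.slice_from_one, ← List.map_tail]
  rw [show [((l.length : Nat) : Int)] = List.map pvCastN [l.length] from rfl]
  rw [← List.map_append, List.zip_map, List.foldl_map]
  congr 1
  funext res p
  cases p with
  | mk s e =>
    simp only [pvStepB, pvStepN, Prod.map, pvCastN, PySem.List.pyGetD_natCast]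

theorem pvAlt_nil (m : Int) : simplify_notes_py_alt [] m = [] := by
  rw [pvAlt_eq_fold]
  simp [pvSN_nil]

-- the loop body only looks at the list past the first run
theorem pvStepN_shift (pre : List (Option String)) (ks' : List (Option String))
    (prel rest : List (Option (List (String × String)))) (m : Int) (L : Nat)
    (h1 : pre.length = L) (h2 : prel.length = L)
    (res : List (List (String × String))) (s e : Nat) :
    pvStepN (pre ++ ks') (prel ++ rest) m res (s + L, e + L)
      = pvStepN ks' rest m res (s, e) := by
  simp only [pvStepN]
  have hg1 : (pre ++ ks').getD (s + L) none = ks'.getD s none := by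
    rw [List.getD_eq_getElem?_getD, List.getElem?_append_right (by omega), h1,
      Nat.add_sub_cancel, List.getD_eq_getElem?_getD]
  have hg2 : (prel ++ rest).getD (s + L) none = rest.getD s none := by
    rw [List.getD_eq_getElem?_getD, List.getElem?_append_right (by omega), h2,
      Nat.add_sub_cancel, List.getD_eq_getElem?_getD]
  have hg3 : ((e + L : Nat) : Int) - ((s + L : Nat) : Int) = (e : Int) - (s : Int) := by
    push_cast; ring
  rw [hg1, hg2, hg3]

-- key list of x :: xs = constant run of x's key, then the keys of the rest
theorem pvKeys_decomp (x : Option (List (String × String)))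
    (xs : List (Option (List (String × String)))) :
    (x :: xs).map pvKeyB
      = List.replicate ((xs.takeWhile (fun y => pvKeyB y == pvKeyB x)).length + 1) (pvKeyB x)
        ++ (xs.dropWhile (fun y => pvKeyB y == pvKeyB x)).map pvKeyB := by
  have hsplit : xs = xs.takeWhile (fun y => pvKeyB y == pvKeyB x)
      ++ xs.dropWhile (fun y => pvKeyB y == pvKeyB x) :=
    (List.takeWhile_append_dropWhile).symm
  have htk : (xs.takeWhile (fun y => pvKeyB y == pvKeyB x)).map pvKeyB
      = List.replicate (xs.takeWhile (fun y => pvKeyB y == pvKeyB x)).length (pvKeyB x) := by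
    apply List.eq_replicate_iff.mpr
    refine ⟨by simp, ?_⟩
    intro b hb
    obtain ⟨y, hy, rfl⟩ := List.mem_map.mp hb
    have hp := List.mem_takeWhile_imp hy
    exact eq_of_beq (by simpa using hp)
  conv_lhs => rw [hsplit]
  rw [List.map_cons, List.map_append, htk, List.replicate_succ]
  rfl

-- the first element after a run has a different key
theorem pvRest_head_ne (x : Option (List (String × String)))
    (xs : List (Option (List (String × String)))) :
    ((xs.dropWhile (fun y => pvKeyB y == pvKeyB x)).map pvKeyB) ≠ [] →
      ((xs.dropWhile (fun y => pvKeyB y == pvKeyB x)).map pvKeyB).getD 0 none ≠ pvKeyB x := by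
  intro hne
  cases hd : xs.dropWhile (fun y => pvKeyB y == pvKeyB x) with
  | nil => rw [hd] at hne; simp at hne
  | cons y ys =>
    have h2 : xs.dropWhile (fun y => pvKeyB y == pvKeyB x) ≠ [] := by simp [hd]
    have h3 := List.head_dropWhile_not (fun y => pvKeyB y == pvKeyB x) h2
    have h4 : (xs.dropWhile (fun y => pvKeyB y == pvKeyB x)).head h2 = y := by simp [hd]
    rw [h4] at h3
    simpa using h3

-- peeling the first run off port B
theorem pvAlt_cons (x : Option (List (String × String)))
    (xs : List (Option (List (String × String)))) (m : Int) :
    simplify_notes_py_alt (x :: xs) m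
      = (match x with
         | some d => if m ≤ (1 + (xs.takeWhile (fun y => pvKeyB y == pvKeyB x)).length : Int)
             then [d] else []
         | none => [])
        ++ simplify_notes_py_alt (xs.dropWhile (fun y => pvKeyB y == pvKeyB x)) m := by
  have hkeys := pvKeys_decomp x xs
  have hb := pvRest_head_ne x xs
  have hsplit : xs = xs.takeWhile (fun y => pvKeyB y == pvKeyB x)
      ++ xs.dropWhile (fun y => pvKeyB y == pvKeyB x) := (List.takeWhile_append_dropWhile).symm
  generalize ht : xs.takeWhile (fun y => pvKeyB y == pvKeyB x) = t at hkeys hsplit ⊢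
  generalize hr : xs.dropWhile (fun y => pvKeyB y == pvKeyB x) = rest at hkeys hb hsplit ⊢
  subst hsplit
  rw [pvAlt_eq_fold, hkeys,
    pvSN_shift (pvKeyB x) (rest.map pvKeyB) (t.length + 1) (by omega) hb]
  have hlen : (x :: (t ++ rest)).length = (t.length + 1) + rest.length := by
    simp [List.length_append]; omega
  rw [hlen]
  simp only [List.tail_cons]
  have hks0 : (List.replicate (t.length + 1) (pvKeyB x) ++ rest.map pvKeyB).getD 0 none
      = pvKeyB x := by
    rw [List.getD_eq_getElem?_getD, List.getElem?_append_left (by simp),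
      List.getElem?_replicate_of_lt (by omega), Option.getD_some]
  have hnl0 : (x :: (t ++ rest)).getD 0 none = x := rfl
  by_cases hre : rest = []
  · subst hre
    rw [pvAlt_nil]
    simp only [List.map_nil, pvSN_nil, List.nil_append, List.zip_cons_cons, List.zip_nil_left,
      List.foldl_cons, List.foldl_nil, List.append_nil, List.length_nil, Nat.add_zero]
    simp only [pvStepN]
    have hks0' : (List.replicate (t.length + 1) (pvKeyB x)).getD 0 none = pvKeyB x := by
      rw [List.getD_eq_getElem?_getD, List.getElem?_replicate_of_lt (by omega), Option.getD_some]
    have hnl0' : (x :: t).getD 0 none = x := rfl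
    rw [hks0', hnl0']
    cases x with
    | none =>
      rw [if_neg (by simp [pvKeyB])]
    | some d =>
      have harr : ((t.length + 1 : Nat) : Int) - ((0 : Nat) : Int)
          = 1 + (t.length : Int) := by push_cast; ring
      rw [harr]
      have hkne : pvKeyB (some d) ≠ none := by simp [pvKeyB]
      by_cases hm : m ≤ 1 + (t.length : Int)
      · rw [if_pos ⟨hkne, hm⟩]; simp [hm]
      · rw [if_neg (by tauto)]; simp [hm]
  · obtain ⟨S2, hS⟩ := pvSN_ne_nil (rest.map pvKeyB) (by simpa using hre)
    rw [hS]
    simp only [List.map_cons, List.cons_append, List.zip_cons_cons, List.foldl_cons]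
    rw [pvStepN_acc]
    congr 1
    · simp only [pvStepN, hks0, hnl0]
      cases x with
      | none =>
        rw [if_neg (by simp [pvKeyB])]
      | some d =>
        have harr : ((0 + (t.length + 1) : Nat) : Int) - ((0 : Nat) : Int)
            = 1 + (t.length : Int) := by push_cast; ring
        rw [harr]
        have hkne : pvKeyB (some d) ≠ none := by simp [pvKeyB]
        by_cases hm : m ≤ 1 + (t.length : Int)
        · rw [if_pos ⟨hkne, hm⟩]; simp [hm]
        · rw [if_neg (by tauto)]; simp [hm]
    · have hz1 : (0 + (t.length + 1)) :: S2.map (· + (t.length + 1))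
          = (0 :: S2).map (· + (t.length + 1)) := by simp
      have hz2 : S2.map (· + (t.length + 1)) ++ [(t.length + 1) + rest.length]
          = (S2 ++ [rest.length]).map (· + (t.length + 1)) := by simp [Nat.add_comm]
      rw [hz1, hz2, List.zip_map, List.foldl_map]
      have hfun : (fun (acc : List (List (String × String))) (p : Nat × Nat) =>
          pvStepN (List.replicate (t.length + 1) (pvKeyB x) ++ rest.map pvKeyB)
            (x :: (t ++ rest)) m acc
            (Prod.map (· + (t.length + 1)) (· + (t.length + 1)) p))
          = pvStepN (rest.map pvKeyB) rest m := by
        funext acc p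
        cases p with
        | mk s e =>
          exact pvStepN_shift (List.replicate (t.length + 1) (pvKeyB x)) (rest.map pvKeyB)
            (x :: t) rest m (t.length + 1) (by simp) (by simp) acc s e
      rw [hfun, pvAlt_eq_fold rest m, hS]
      simp only [List.tail_cons]

-- port B computes the groupby form
theorem pvAlt_eq_GB : ∀ (n : Nat) (l : List (Option (List (String × String)))),
    l.length ≤ n → ∀ m, simplify_notes_py_alt l m = pvGB l m := by
  intro n
  induction n with
  | zero =>
    intro l hl m
    have : l = [] := List.eq_nil_of_length_eq_zero (Nat.le_zero.mp hl)
    subst this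
    rw [pvAlt_nil]
    simp [pvGB, pvGroups]
  | succ n ih =>
    intro l hl m
    cases l with
    | nil => rw [pvAlt_nil]; simp [pvGB, pvGroups]
    | cons x xs =>
      rw [pvAlt_cons]
      have hdl : (xs.dropWhile (fun y => pvKeyB y == pvKeyB x)).length ≤ n := by
        have := List.length_dropWhile_le (fun y => pvKeyB y == pvKeyB x) xs
        simp at hl
        omega
      rw [ih _ hdl m]
      cases x with
      | none => rw [pvGB_cons_none]; rfl
      | some d => rw [pvGB_cons_some]

-- ===== VERDICT (by name: the statement is the Claim_ definition above) =====
theorem simplify_notes_py_spec : Claim_equal_simplify_notes_py := by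
  intro notes min_duration _ hpre
  unfold Spec_simplify_notes_py
  rw [pvAlt_eq_GB notes.length notes (le_refl _) min_duration]
  cases notes with
  | nil => simp [simplify_notes_py, pvGB, pvGroups]
  | cons x xs =>
    have h := (pvMain min_duration (x :: xs).length (x :: xs) (le_refl _) hpre).1
    simpa [simplify_notes_py, pvFinA] using h
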